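-- pv_equiv track=rewrite | github.com/rawwerks/flatagents | test_machine_properties.py | compute_reachable_states
-- ===== SOURCE A (Python) =====
-- def compute_reachable_states(config, start):
--     """Compute reachable states via DFS"""
--     visited = set()
--     stack = [start]
--
--     while stack:
--         state = stack.pop()
--         if state in visited or state not in config['states']:
--             continue
--
--         visited.add(state)
--
--         transitions = config['states'][state].get('transitions', [])
--         for trans in transitions:
--             target = trans.get('to')
--             if target and target not in visited:
--                 stack.append(target)
--
--     return visited
-- ===== SOURCE B (Python) =====
-- def compute_reachable_states(config, start):
--     """Compute reachable states via recursive DFS"""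
--     states = config['states']
--     visited = set()
--
--     def visit(state):
--         if state in visited or state not in states:
--             return
--         visited.add(state)
--         for trans in reversed(states[state].get('transitions', [])):
--             target = trans.get('to')
--             if target and target not in visited:
--                 visit(target)
--
--     visit(start)
--     return visited
-- ===== Notes on version B (the rewrite author's own statement) =====
-- stated objective: alternative
-- what changed: The explicit stack loop (push targets, pop, re-check visited) is replaced by a recursive inner visit() helper that recurses directly into each unvisited target, so no worklist and no stale stack entries are maintained.
import Mathlib
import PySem

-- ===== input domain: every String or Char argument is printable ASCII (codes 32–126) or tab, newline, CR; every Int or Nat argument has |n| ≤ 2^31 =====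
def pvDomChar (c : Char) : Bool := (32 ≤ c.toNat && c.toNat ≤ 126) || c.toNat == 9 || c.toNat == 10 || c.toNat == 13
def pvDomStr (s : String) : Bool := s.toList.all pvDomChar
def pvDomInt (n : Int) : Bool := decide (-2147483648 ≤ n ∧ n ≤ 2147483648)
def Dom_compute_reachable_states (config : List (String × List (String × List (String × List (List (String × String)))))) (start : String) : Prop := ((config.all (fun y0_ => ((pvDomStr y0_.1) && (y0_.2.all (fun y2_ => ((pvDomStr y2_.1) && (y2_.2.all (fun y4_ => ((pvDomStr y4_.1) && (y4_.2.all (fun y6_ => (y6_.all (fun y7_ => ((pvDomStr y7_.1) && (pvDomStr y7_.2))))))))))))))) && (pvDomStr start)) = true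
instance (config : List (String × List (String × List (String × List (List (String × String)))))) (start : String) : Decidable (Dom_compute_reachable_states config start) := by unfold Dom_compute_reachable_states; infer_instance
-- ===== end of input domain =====

-- B replaces A's explicit worklist stack by a recursive DFS helper; equivalence is exact
-- (same visited set, same insertion order). Objective: alternative decomposition, no speed claim.

-- ===== PORT A =====
-- shared helper: Python dict lookup on an association list (first match)
def pvGet? {α : Type} (l : List (String × α)) (k : String) : Option α :=
  (l.find? (fun p => p.1 == k)).map (·.2)

-- number of state keys not yet visited (termination measure for both ports)
def pvCountU (states : List (String × List (String × List (List (String × String))))) (v : List String) : Nat :=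
  ((states.map Prod.fst).filter (fun k => !v.contains k)).length

theorem pv_filter_len_le {α : Type} {p q : α → Bool} (h : ∀ x, p x = true → q x = true) :
    ∀ ks : List α, (ks.filter p).length ≤ (ks.filter q).length := by
  intro ks
  induction ks with
  | nil => simp
  | cons a t ih =>
    by_cases hp : p a = true
    · simp [hp, h a hp]; omega
    · simp only [Bool.not_eq_true] at hp
      by_cases hq : q a = true <;> simp [hp, hq] <;> omega

theorem pv_filter_len_lt {α : Type} {p q : α → Bool} (h : ∀ x, p x = true → q x = true)
    {k : α} (hq : q k = true) (hp : p k = false) :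
    ∀ ks : List α, k ∈ ks → (ks.filter p).length < (ks.filter q).length := by
  intro ks
  induction ks with
  | nil => simp
  | cons a t ih =>
    intro hmem
    rcases List.mem_cons.1 hmem with rfl | hmem
    · simp [hp, hq]
      have := pv_filter_len_le h t
      omega
    · have := ih hmem
      by_cases hpa : p a = true
      · simp [hpa, h a hpa]; omega
      · simp only [Bool.not_eq_true] at hpa
        by_cases hqa : q a = true <;> simp [hpa, hqa] <;> omega

theorem pvGet?_isSome_mem {α : Type} {l : List (String × α)} {k : String}
    (h : (pvGet? l k).isSome) : k ∈ l.map Prod.fst := by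
  unfold pvGet? at h
  rcases ho : l.find? (fun p => p.1 == k) with _ | p
  · rw [ho] at h; simp at h
  · have hm := List.mem_of_find?_eq_some ho
    have hk := List.find?_some ho
    simp at hk
    exact hk ▸ List.mem_map_of_mem hm

theorem pvCountU_mono (states : List (String × List (String × List (List (String × String))))) {v v' : List String}
    (h : ∀ x, x ∈ v → x ∈ v') : pvCountU states v' ≤ pvCountU states v := by
  unfold pvCountU
  apply pv_filter_len_le
  intro x hx
  simp only [Bool.not_eq_true', List.contains_eq_mem, decide_eq_false_iff_not] at *
  exact fun hm => hx (h x hm)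

theorem pvLexHelper {states : List (String × List (String × List (List (String × String))))}
    {visited W : List String} {n m : Nat}
    (hsub : ∀ x, x ∈ visited → x ∈ W) (hnm : n < m) :
    Prod.Lex (fun a₁ a₂ : Nat => a₁ < a₂) (fun a₁ a₂ : Nat => a₁ < a₂)
      (pvCountU states W, n) (pvCountU states visited, m) := by
  rcases lt_or_eq_of_le (pvCountU_mono states hsub) with h | h
  · exact Prod.Lex.left _ _ h
  · rw [h]; exact Prod.Lex.right _ hnm

theorem pvCountU_lt (states : List (String × List (String × List (List (String × String))))) {v : List String} {k : String}
    (hk : (pvGet? states k).isSome) (hv : v.contains k = false) :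
    pvCountU states (v ++ [k]) < pvCountU states v := by
  unfold pvCountU
  apply pv_filter_len_lt _ _ _ _ (pvGet?_isSome_mem hk)
  · intro x hx
    simp only [Bool.not_eq_true', List.contains_eq_mem, decide_eq_false_iff_not, List.mem_append] at *
    exact fun hm => hx (Or.inl hm)
  · simpa using hv
  · simp

-- the body of A's inner `for trans in transitions:` push loop
def pvPushStep (v0 : List String) (st : List String) (tr : List (String × String)) : List String :=
  match pvGet? tr "to" with
  | some t => if t ≠ "" && !v0.contains t then t :: st else st
  | none => st

-- A's `while stack:` loop; the stack's head is Python's list end (`pop`/`append` side)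
def pvLoopA (states : List (String × List (String × List (List (String × String)))))
    (visited : PySem.Set String) (stack : List String) : List String :=
  match stack with
  | [] => visited
  | state :: rest =>
    if hg : (visited.contains state || (pvGet? states state).isNone) = true then
      pvLoopA states visited rest
    else
      let visited' := PySem.Set.add visited state
      let ts := (pvGet? ((pvGet? states state).getD []) "transitions").getD []
      pvLoopA states visited' (ts.foldl (pvPushStep visited') rest)
termination_by (pvCountU states visited, stack.length)
decreasing_by
  · apply Prod.Lex.right; simp
  · apply Prod.Lex.left
    simp only [Bool.or_eq_true, not_or, Bool.not_eq_true, Option.isNone_eq_false_iff] at hg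
    have hnm : state ∉ visited := by simpa using hg.1
    have : PySem.Set.add visited state = visited ++ [state] := by
      simp [PySem.Set.add, hnm]
    rw [this]
    exact pvCountU_lt states hg.2 hg.1

def compute_reachable_states (config : List (String × List (String × List (String × List (List (String × String)))))) (start : String) : List String :=
  match pvGet? config "states" with
  | none => []   -- Python A raises KeyError here; excluded by Pre_
  | some states => pvLoopA states PySem.Set.empty [start]

-- ===== PORT B =====
-- B's recursive inner helper `visit(state)` and its `for trans in reversed(...)` loop;
-- the subtype carries "visit only grows the visited set", needed for termination.
mutual
def pvVisit (states : List (String × List (String × List (List (String × String)))))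
    (visited : PySem.Set String) (state : String) :
    {v : List String // ∀ x, x ∈ visited → x ∈ v} :=
  if hg : (visited.contains state || (pvGet? states state).isNone) = true then
    ⟨visited, fun _ hx => hx⟩
  else
    have hnm : state ∉ visited := by
      simp only [Bool.or_eq_true, not_or, Bool.not_eq_true, Option.isNone_eq_false_iff] at hg
      simpa using hg.1
    have hadd : PySem.Set.add visited state = visited ++ [state] := by
      simp [PySem.Set.add, hnm]
    have hlt : pvCountU states (PySem.Set.add visited state) < pvCountU states visited := by
      simp only [Bool.or_eq_true, not_or, Bool.not_eq_true, Option.isNone_eq_false_iff] at hg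
      rw [hadd]; exact pvCountU_lt states hg.2 (by simpa using hnm)
    let ts := (pvGet? ((pvGet? states state).getD []) "transitions").getD []
    let r := pvVisitList states (PySem.Set.add visited state) ts.reverse
    ⟨r.val, fun x hx => r.property x (by rw [hadd]; exact List.mem_append_left _ hx)⟩
termination_by (pvCountU states visited, 0)
decreasing_by exact Prod.Lex.left _ _ hlt

def pvVisitList (states : List (String × List (String × List (List (String × String)))))
    (visited : PySem.Set String) (ts : List (List (String × String))) :
    {v : List String // ∀ x, x ∈ visited → x ∈ v} :=
  match ts with
  | [] => ⟨visited, fun _ hx => hx⟩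
  | tr :: rest =>
    let w : List String :=
      match pvGet? tr "to" with
      | none => visited
      | some t =>
        if t ≠ "" && !PySem.Set.contains visited t then (pvVisit states visited t).val
        else visited
    have hw : ∀ x, x ∈ visited → x ∈ w := by
      intro x hx
      simp only [w]
      rcases hto : pvGet? tr "to" with _ | t
      · simp only [hto]; exact hx
      · simp only [hto]
        split
        · exact (pvVisit states visited t).property x hx
        · exact hx
    let r := pvVisitList states w rest
    ⟨r.val, fun x hx => r.property x (hw x hx)⟩
termination_by (pvCountU states visited, ts.length + 1)
decreasing_by
  all_goals first
    | (apply Prod.Lex.right; simp)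
    | (refine pvLexHelper ?_ (by simp)
       intro x hx
       split
       · exact hx
       · split
         · exact Subtype.property (p := fun v => ∀ y, y ∈ visited → y ∈ v) _ x hx
         · exact hx)
end

def compute_reachable_states_alt (config : List (String × List (String × List (String × List (List (String × String)))))) (start : String) : List String :=
  match pvGet? config "states" with
  | none => []   -- Python B raises KeyError here; excluded by Pre_
  | some states => (pvVisit states PySem.Set.empty start).val

-- ===== PRECONDITION & SPEC =====
-- Pre_ excludes only the configs without a "states" key, on which both Pythons raise KeyError.
def Pre_compute_reachable_states (config : List (String × List (String × List (String × List (List (String × String)))))) (start : String) : Prop :=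
  "states" ∈ config.map Prod.fst

instance (config : List (String × List (String × List (String × List (List (String × String)))))) (start : String) : Decidable (Pre_compute_reachable_states config start) := by unfold Pre_compute_reachable_states; infer_instance

def pvWitness_compute_reachable_states : (List (String × List (String × List (String × List (List (String × String)))))) × String :=
  ([("states", [("s", [("transitions", [[("to", "a")]])]), ("a", [])])], "s")

def Spec_compute_reachable_states (config : List (String × List (String × List (String × List (List (String × String)))))) (start : String) (out : List String) : Prop := out = compute_reachable_states_alt config start
instance (config : List (String × List (String × List (String × List (List (String × String)))))) (start : String) (out : List String) : Decidable (Spec_compute_reachable_states config start out) := by unfold Spec_compute_reachable_states; infer_instance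

-- ===== CLAIM (what is proved, stated in full; the proofs are below) =====
def Claim_equal_compute_reachable_states : Prop := ∀ (config : List (String × List (String × List (String × List (List (String × String)))))) (start : String), Dom_compute_reachable_states config start → Pre_compute_reachable_states config start → Spec_compute_reachable_states config start (compute_reachable_states config start)

-- ===== LEMMAS AND PROOFS =====
theorem pvVisit_stop (states : List (String × List (String × List (List (String × String)))))
    (visited : PySem.Set String) (state : String)
    (hg : (visited.contains state || (pvGet? states state).isNone) = true) :
    (pvVisit states visited state).val = visited := by
  have hg' : state ∈ visited ∨ pvGet? states state = none := by
    simpa [List.contains_eq_mem, Option.isNone_iff_eq_none] using hg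
  rw [pvVisit]
  simp [hg']

theorem pvVisit_go (states : List (String × List (String × List (List (String × String)))))
    (visited : PySem.Set String) (state : String)
    (hg : ¬ (visited.contains state || (pvGet? states state).isNone) = true) :
    (pvVisit states visited state).val =
      (pvVisitList states (PySem.Set.add visited state)
        ((pvGet? ((pvGet? states state).getD []) "transitions").getD []).reverse).val := by
  have hg' : ¬ (state ∈ visited ∨ pvGet? states state = none) := by
    simp only [Bool.or_eq_true, not_or, Bool.not_eq_true, Option.isNone_eq_false_iff] at hg
    simp only [not_or, Option.isSome_iff_ne_none] at *
    constructor
    · simpa using hg.1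
    · exact hg.2
  rw [pvVisit]
  simp [hg']

-- the Option value A's push step appends for one transition dict (w.r.t. the fixed set v0)
def pvTgt? (v0 : List String) (tr : List (String × String)) : Option String :=
  match pvGet? tr "to" with
  | some t => if t ≠ "" && !v0.contains t then some t else none
  | none => none

theorem pvPush_eq (v0 : List String) :
    ∀ (ts : List (List (String × String))) (rest : List String),
      ts.foldl (pvPushStep v0) rest = (ts.filterMap (pvTgt? v0)).reverse ++ rest := by
  intro ts
  induction ts with
  | nil => intro rest; simp
  | cons tr rest' ih =>
    intro rest
    rw [List.foldl_cons, List.filterMap_cons, ih]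
    unfold pvPushStep pvTgt?
    rcases h : pvGet? tr "to" with _ | t
    · simp
    · by_cases hc : ¬t = "" ∧ t ∉ v0
      · simp [hc]
      · simp [hc]

theorem pvVisitList_cons (states : List (String × List (String × List (List (String × String)))))
    (v : List String) (tr : List (String × String)) (rest : List (List (String × String)))
    (w : List String)
    (hwv : w = (match pvGet? tr "to" with
      | none => v
      | some t =>
        if t ≠ "" && !PySem.Set.contains v t then (pvVisit states v t).val else v)) :
    (pvVisitList states v (tr :: rest)).val = (pvVisitList states w rest).val := by
  subst hwv; rw [pvVisitList]

theorem pvCore (states : List (String × List (String × List (List (String × String))))) :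
    ∀ (us : List (List (String × String))) (v0 v : List String),
      (∀ x, x ∈ v0 → x ∈ v) →
      (us.filterMap (pvTgt? v0)).foldl (fun w s => (pvVisit states w s).val) v
        = (pvVisitList states v us).val := by
  intro us
  induction us with
  | nil => intro v0 v h; rw [pvVisitList]; simp
  | cons tr rest ih =>
    intro v0 v h
    rcases hto : pvGet? tr "to" with _ | t
    · have h1 : pvTgt? v0 tr = none := by simp [pvTgt?, hto]
      rw [List.filterMap_cons, h1, pvVisitList_cons states v tr rest v (by rw [hto])]
      exact ih v0 v h
    · by_cases ht : ¬t = "" ∧ t ∉ v0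
      · have h1 : pvTgt? v0 tr = some t := by
          simp only [pvTgt?, hto]
          simp [List.contains_eq_mem, ht.1, ht.2]
        by_cases hv : t ∈ v
        · have hstop : (pvVisit states v t).val = v :=
            pvVisit_stop _ _ _ (by simp [List.contains_eq_mem, hv])
          have h2 := pvVisitList_cons states v tr rest v (by
            rw [hto]
            simp [PySem.Set.contains, List.contains_eq_mem, hv])
          rw [List.filterMap_cons, h1, h2, List.foldl_cons]
          simp only [hstop]
          exact ih v0 v h
        · have h2 := pvVisitList_cons states v tr rest (pvVisit states v t).val (by
            rw [hto]
            simp [PySem.Set.contains, List.contains_eq_mem, hv, ht.1])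
          rw [List.filterMap_cons, h1, h2, List.foldl_cons]
          exact ih v0 (pvVisit states v t).val
            (fun x hx => (pvVisit states v t).property x (h x hx))
      · have h1 : pvTgt? v0 tr = none := by
          simp only [pvTgt?, hto]
          rcases not_and_or.1 ht with h1 | h1
          · push_neg at h1; simp [h1]
          · simp [List.contains_eq_mem, not_not.1 h1]
        have hwv : v = (match pvGet? tr "to" with
            | none => v
            | some t' =>
              if t' ≠ "" && !PySem.Set.contains v t' then (pvVisit states v t').val else v) := by
          rw [hto]
          rcases not_and_or.1 ht with h1 | h1
          · push_neg at h1; simp [h1]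
          · have : t ∈ v := h t (not_not.1 h1)
            simp [PySem.Set.contains, List.contains_eq_mem, this]
        rw [List.filterMap_cons, h1, pvVisitList_cons states v tr rest v hwv]
        exact ih v0 v h

theorem pvLoop_eq (states : List (String × List (String × List (List (String × String))))) :
    ∀ (visited : PySem.Set String) (stack : List String),
      pvLoopA states visited stack
        = stack.foldl (fun w s => (pvVisit states w s).val) visited := by
  intro visited stack
  induction visited, stack using pvLoopA.induct states with
  | case1 visited => rw [pvLoopA]; rfl
  | case2 visited state rest hg ih =>
    rw [pvLoopA]
    simp only [hg, dite_true, List.foldl_cons, pvVisit_stop states visited state hg]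
    exact ih
  | case3 visited state rest hg v' ts ih =>
    rw [pvLoopA]
    simp only [hg, Bool.false_eq_true, dite_false]
    rw [ih, pvPush_eq, List.foldl_append, ← List.filterMap_reverse,
        pvCore states _ _ _ (fun x hx => hx),
        ← pvVisit_go states visited state hg, List.foldl_cons]

-- ===== VERDICT (by name: the statement is the Claim_ definition above) =====
theorem compute_reachable_states_spec : Claim_equal_compute_reachable_states := by
  unfold Claim_equal_compute_reachable_states
  intro config start _ _
  unfold Spec_compute_reachable_states compute_reachable_states compute_reachable_states_alt
  rcases h : pvGet? config "states" with _ | states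
  · rfl
  · simp only [h]
    rw [pvLoop_eq]
    rfl
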